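-- pv_equiv track=rewrite | github.com/chriswengqi/kattis | samedigitseasy/samedigitseasy.py | digit_preserve
-- ===== SOURCE A (Python) =====
-- def digit_preserve(a, b, c):
--     dat = [0] * 10
--     while a > 0:
--         dat[a % 10] += 1
--         a //= 10
--     while b > 0:
--         dat[b % 10] += 1
--         b //= 10
--     while c > 0:
--         dat[c % 10] -= 1
--         c //= 10
--     return min(dat) == 0 and max(dat) == 0
-- ===== SOURCE B (Python) =====
-- def digit_preserve(a, b, c):
--     def digits(x):
--         ds = []
--         while x > 0:
--             ds.append(x % 10)
--             x //= 10
--         return ds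
--     return sorted(digits(a) + digits(b)) == sorted(digits(c))
-- ===== Notes on version B (the rewrite author's own statement) =====
-- stated objective: idiomatic
-- what changed: B peels the digits into lists and compares sorted(digits(a)+digits(b)) with sorted(digits(c)), replacing A's fixed 10-slot frequency array with its min/max-zero test by a sort-and-compare of the two digit multisets.
import Mathlib
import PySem

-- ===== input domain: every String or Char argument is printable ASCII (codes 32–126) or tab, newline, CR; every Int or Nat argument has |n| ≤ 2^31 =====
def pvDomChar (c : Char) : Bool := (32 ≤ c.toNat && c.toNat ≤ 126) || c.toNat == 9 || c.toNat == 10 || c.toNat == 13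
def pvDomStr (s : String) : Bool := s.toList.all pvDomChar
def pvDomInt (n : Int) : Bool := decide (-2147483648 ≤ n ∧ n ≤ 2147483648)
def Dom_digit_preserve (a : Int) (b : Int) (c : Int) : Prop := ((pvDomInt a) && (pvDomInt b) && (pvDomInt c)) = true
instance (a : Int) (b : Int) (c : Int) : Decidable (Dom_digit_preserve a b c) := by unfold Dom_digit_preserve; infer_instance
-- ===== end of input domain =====

-- B replaces A's 10-slot frequency array (min==0 and max==0 test) by peeling the digits
-- into lists and comparing the two sorted digit lists (idiomatic sort-and-compare).

-- ===== PORT A =====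
-- 'while x > 0: dat[x % 10] += 1; x //= 10'
def pvIncLoop (x : Int) (dat : List Int) : List Int :=
  if 0 < x then
    pvIncLoop (PySem.Int.floordiv x 10)
      (PySem.List.pySetD dat (PySem.Int.mod x 10)
        (PySem.List.pyGetD dat (PySem.Int.mod x 10) 0 + 1))
  else dat
termination_by x.toNat
decreasing_by
  have h1 : PySem.Int.floordiv x 10 = x / 10 := PySem.Int.floordiv_eq_ediv_of_pos (by omega)
  omega

-- 'while x > 0: dat[x % 10] -= 1; x //= 10'
def pvDecLoop (x : Int) (dat : List Int) : List Int :=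
  if 0 < x then
    pvDecLoop (PySem.Int.floordiv x 10)
      (PySem.List.pySetD dat (PySem.Int.mod x 10)
        (PySem.List.pyGetD dat (PySem.Int.mod x 10) 0 - 1))
  else dat
termination_by x.toNat
decreasing_by
  have h1 : PySem.Int.floordiv x 10 = x / 10 := PySem.Int.floordiv_eq_ediv_of_pos (by omega)
  omega

def digit_preserve (a : Int) (b : Int) (c : Int) : Bool :=
  let dat0 : List Int := List.replicate 10 0
  let dat1 := pvIncLoop a dat0
  let dat2 := pvIncLoop b dat1
  let dat3 := pvDecLoop c dat2
  (PySem.List.min? dat3 (fun y => y) == some 0) && (PySem.List.max? dat3 (fun y => y) == some 0)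

-- ===== PORT B =====
-- 'ds = []; while x > 0: ds.append(x % 10); x //= 10; return ds'
def pvDigitsAux (ds : List Int) (x : Int) : List Int :=
  if 0 < x then
    pvDigitsAux (ds ++ [PySem.Int.mod x 10]) (PySem.Int.floordiv x 10)
  else ds
termination_by x.toNat
decreasing_by
  have h1 : PySem.Int.floordiv x 10 = x / 10 := PySem.Int.floordiv_eq_ediv_of_pos (by omega)
  omega

def digit_preserve_alt (a : Int) (b : Int) (c : Int) : Bool :=
  PySem.List.sorted (pvDigitsAux [] a ++ pvDigitsAux [] b) (fun y => y) false
    == PySem.List.sorted (pvDigitsAux [] c) (fun y => y) false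

-- ===== PRECONDITION & SPEC =====
def Spec_digit_preserve (a : Int) (b : Int) (c : Int) (out : Bool) : Prop := out = digit_preserve_alt a b c
instance (a : Int) (b : Int) (c : Int) (out : Bool) : Decidable (Spec_digit_preserve a b c out) := by unfold Spec_digit_preserve; infer_instance

-- ===== CLAIM (what is proved, stated in full; the proofs are below) =====
def Claim_equal_digit_preserve : Prop := ∀ (a : Int) (b : Int) (c : Int), Dom_digit_preserve a b c → Spec_digit_preserve a b c (digit_preserve a b c)

-- ===== LEMMAS AND PROOFS =====

lemma pvDigitsAux_stop {x : Int} (h : ¬ 0 < x) (ds : List Int) : pvDigitsAux ds x = ds := by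
  rw [pvDigitsAux]; simp [h]

lemma pvDigitsAux_append_aux : ∀ (n : Nat) (x : Int), x.toNat ≤ n →
    ∀ ds : List Int, pvDigitsAux ds x = ds ++ pvDigitsAux [] x := by
  intro n
  induction n with
  | zero =>
    intro x hx ds
    have h : ¬ 0 < x := by omega
    rw [pvDigitsAux_stop h, pvDigitsAux_stop h]
    simp
  | succ n IH =>
    intro x hx ds
    by_cases h : 0 < x
    · have hf : PySem.Int.floordiv x 10 = x / 10 := PySem.Int.floordiv_eq_ediv_of_pos (by omega)
      have hlt : (PySem.Int.floordiv x 10).toNat ≤ n := by rw [hf]; omega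
      have h1 : pvDigitsAux ds x
          = pvDigitsAux (ds ++ [PySem.Int.mod x 10]) (PySem.Int.floordiv x 10) := by
        rw [pvDigitsAux]; simp [h]
      have h2 : pvDigitsAux ([] : List Int) x
          = pvDigitsAux ([] ++ [PySem.Int.mod x 10]) (PySem.Int.floordiv x 10) := by
        rw [pvDigitsAux]; simp [h]
      rw [h1, h2, IH _ hlt (ds ++ [PySem.Int.mod x 10]), IH _ hlt ([] ++ [PySem.Int.mod x 10])]
      simp
    · rw [pvDigitsAux_stop h, pvDigitsAux_stop h]; simp

lemma pvDigitsAux_append (ds : List Int) (x : Int) :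
    pvDigitsAux ds x = ds ++ pvDigitsAux [] x :=
  pvDigitsAux_append_aux x.toNat x le_rfl ds

lemma pvDigits_nil {x : Int} (h : ¬ 0 < x) : pvDigitsAux [] x = [] :=
  pvDigitsAux_stop h []

lemma pvDigits_cons {x : Int} (h : 0 < x) :
    pvDigitsAux [] x = PySem.Int.mod x 10 :: pvDigitsAux [] (PySem.Int.floordiv x 10) := by
  conv_lhs => rw [pvDigitsAux]
  rw [if_pos h, pvDigitsAux_append]
  simp

lemma mem_pvDigits_aux : ∀ (n : Nat) (x : Int), x.toNat ≤ n →
    ∀ y ∈ pvDigitsAux [] x, 0 ≤ y ∧ y < 10 := by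
  intro n
  induction n with
  | zero =>
    intro x hx y hy
    rw [pvDigits_nil (by omega)] at hy
    simp at hy
  | succ n IH =>
    intro x hx y hy
    by_cases h : 0 < x
    · rw [pvDigits_cons h] at hy
      rcases List.mem_cons.1 hy with h' | h'
      · subst h'
        exact ⟨PySem.Int.mod_nonneg x (by omega), PySem.Int.mod_lt x (by omega)⟩
      · have hf : PySem.Int.floordiv x 10 = x / 10 := PySem.Int.floordiv_eq_ediv_of_pos (by omega)
        exact IH _ (by rw [hf]; omega) y h'
    · rw [pvDigits_nil h] at hy; simp at hy

lemma mem_pvDigits {y x : Int} (h : y ∈ pvDigitsAux [] x) : 0 ≤ y ∧ y < 10 :=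
  mem_pvDigits_aux x.toNat x le_rfl y h

-- A's while-loops are folds of the digit list over the bump operation
lemma pvIncLoop_eq_foldl_aux : ∀ (n : Nat) (x : Int), x.toNat ≤ n → ∀ dat : List Int,
    pvIncLoop x dat =
      (pvDigitsAux [] x).foldl
        (fun d g => PySem.List.pySetD d g (PySem.List.pyGetD d g 0 + 1)) dat := by
  intro n
  induction n with
  | zero =>
    intro x hx dat
    have h : ¬ 0 < x := by omega
    rw [pvIncLoop, pvDigits_nil h]
    simp [h]
  | succ n IH =>
    intro x hx dat
    by_cases h : 0 < x
    · have hf : PySem.Int.floordiv x 10 = x / 10 := PySem.Int.floordiv_eq_ediv_of_pos (by omega)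
      rw [pvIncLoop, pvDigits_cons h]
      simp only [if_pos h, List.foldl_cons]
      exact IH _ (by rw [hf]; omega) _
    · rw [pvIncLoop, pvDigits_nil h]; simp [h]

lemma pvIncLoop_eq_foldl (x : Int) (dat : List Int) :
    pvIncLoop x dat =
      (pvDigitsAux [] x).foldl
        (fun d g => PySem.List.pySetD d g (PySem.List.pyGetD d g 0 + 1)) dat :=
  pvIncLoop_eq_foldl_aux x.toNat x le_rfl dat

lemma pvDecLoop_eq_foldl_aux : ∀ (n : Nat) (x : Int), x.toNat ≤ n → ∀ dat : List Int,
    pvDecLoop x dat =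
      (pvDigitsAux [] x).foldl
        (fun d g => PySem.List.pySetD d g (PySem.List.pyGetD d g 0 + (-1))) dat := by
  intro n
  induction n with
  | zero =>
    intro x hx dat
    have h : ¬ 0 < x := by omega
    rw [pvDecLoop, pvDigits_nil h]
    simp [h]
  | succ n IH =>
    intro x hx dat
    by_cases h : 0 < x
    · have hf : PySem.Int.floordiv x 10 = x / 10 := PySem.Int.floordiv_eq_ediv_of_pos (by omega)
      rw [pvDecLoop, pvDigits_cons h]
      simp only [if_pos h, List.foldl_cons, sub_eq_add_neg]
      exact IH _ (by rw [hf]; omega) _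
    · rw [pvDecLoop, pvDigits_nil h]; simp [h]

lemma pvDecLoop_eq_foldl (x : Int) (dat : List Int) :
    pvDecLoop x dat =
      (pvDigitsAux [] x).foldl
        (fun d g => PySem.List.pySetD d g (PySem.List.pyGetD d g 0 + (-1))) dat :=
  pvDecLoop_eq_foldl_aux x.toNat x le_rfl dat

-- effect of a fold of bumps on length and entries
lemma foldl_bump_spec (δ : Int) : ∀ (l : List Int) (dat : List Int),
    (∀ y ∈ l, 0 ≤ y ∧ y < (dat.length : Int)) →
    ((l.foldl (fun d g => PySem.List.pySetD d g (PySem.List.pyGetD d g 0 + δ)) dat).length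
        = dat.length) ∧
    (∀ k : Nat, (l.foldl (fun d g => PySem.List.pySetD d g (PySem.List.pyGetD d g 0 + δ)) dat).getD k 0
        = dat.getD k 0 + δ * (l.count (k : Int) : Int)) := by
  intro l
  induction l with
  | nil => intro dat _; simp
  | cons g t IH =>
    intro dat h
    have hg := h g (by simp)
    have hglt : g.toNat < dat.length := by omega
    have hset : PySem.List.pySetD dat g (PySem.List.pyGetD dat g 0 + δ)
        = dat.set g.toNat (dat.getD g.toNat 0 + δ) := by
      rw [PySem.List.pySetD_of_nonneg dat _ hg.1, PySem.List.pyGetD_eq_getElem dat 0 hg.1 hg.2,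
        List.getD_eq_getElem dat 0 hglt]
    simp only [List.foldl_cons, hset]
    have hlen1 : (dat.set g.toNat (dat.getD g.toNat 0 + δ)).length = dat.length :=
      List.length_set
    obtain ⟨L, E⟩ := IH (dat.set g.toNat (dat.getD g.toNat 0 + δ))
      (by intro y hy
          have := h y (List.mem_cons_of_mem _ hy)
          rwa [hlen1])
    refine ⟨by rw [L, hlen1], ?_⟩
    intro k
    rw [E k]
    have hd1 : (dat.set g.toNat (dat.getD g.toNat 0 + δ)).getD k 0
        = if k = g.toNat then dat.getD k 0 + δ else dat.getD k 0 := by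
      rw [List.getD_eq_getElem?_getD, List.getElem?_set]
      by_cases hkg : g.toNat = k
      · subst hkg
        simp [hglt, List.getD_eq_getElem?_getD]
      · simp [hkg, Ne.symm hkg, List.getD_eq_getElem?_getD]
    have hcast : ((k : Int) = g) ↔ (k = g.toNat) := by omega
    by_cases hkg : k = g.toNat
    · have hkint : (k : Int) = g := hcast.2 hkg
      rw [hd1, if_pos hkg, List.count_cons]
      simp only [beq_iff_eq]
      rw [if_pos hkint.symm]
      push_cast
      ring
    · have hkint : ¬ ((k : Int) = g) := fun hh => hkg (hcast.1 hh)
      rw [hd1, if_neg hkg, List.count_cons]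
      simp only [beq_iff_eq]
      rw [if_neg (fun hh => hkint hh.symm)]
      push_cast
      ring

lemma minmax_zero_iff (l : List Int) (hne : l ≠ []) :
    (((PySem.List.min? l (fun y => y) == some 0) && (PySem.List.max? l (fun y => y) == some 0)) = true
      ↔ ∀ y ∈ l, y = 0) := by
  constructor
  · intro hb y hy
    simp only [Bool.and_eq_true, beq_iff_eq] at hb
    have h1 := PySem.List.min?_isMin hb.1 y hy
    have h2 := PySem.List.max?_isMax hb.2 y hy
    simp at h1 h2
    omega
  · intro hz
    rcases hm : PySem.List.min? l (fun y => y) with _ | m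
    · exact absurd ((PySem.List.min?_eq_none_iff _ _).1 hm) hne
    rcases hM : PySem.List.max? l (fun y => y) with _ | M
    · exact absurd ((PySem.List.max?_eq_none_iff _ _).1 hM) hne
    have h1 : m = 0 := hz m (PySem.List.min?_mem hm)
    have h2 : M = 0 := hz M (PySem.List.max?_mem hM)
    simp [h1, h2]

-- ===== VERDICT (by name: the statement is the Claim_ definition above) =====
theorem digit_preserve_spec : Claim_equal_digit_preserve := by
  intro a b c _
  unfold Spec_digit_preserve digit_preserve digit_preserve_alt
  simp only []
  rw [pvIncLoop_eq_foldl, pvIncLoop_eq_foldl, pvDecLoop_eq_foldl]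
  set da := pvDigitsAux [] a with hda
  set db := pvDigitsAux [] b with hdb
  set dc := pvDigitsAux [] c with hdc
  have hmem : ∀ (x : Int) (y : Int), y ∈ pvDigitsAux [] x → 0 ≤ y ∧ y < 10 :=
    fun x y hy => mem_pvDigits hy
  obtain ⟨L1, E1⟩ := foldl_bump_spec 1 da (List.replicate 10 (0 : Int))
    (by intro y hy; have := hmem a y (hda ▸ hy); simpa using this)
  set d1 := da.foldl (fun d g => PySem.List.pySetD d g (PySem.List.pyGetD d g 0 + 1))
    (List.replicate 10 (0 : Int)) with hd1
  obtain ⟨L2, E2⟩ := foldl_bump_spec 1 db d1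
    (by intro y hy
        have := hmem b y (hdb ▸ hy)
        rw [L1]
        simpa using this)
  set d2 := db.foldl (fun d g => PySem.List.pySetD d g (PySem.List.pyGetD d g 0 + 1)) d1 with hd2
  obtain ⟨L3, E3⟩ := foldl_bump_spec (-1) dc d2
    (by intro y hy
        have := hmem c y (hdc ▸ hy)
        rw [L2, L1]
        simpa using this)
  set d3 := dc.foldl (fun d g => PySem.List.pySetD d g (PySem.List.pyGetD d g 0 + (-1))) d2 with hd3
  have hlen3 : d3.length = 10 := by rw [L3, L2, L1]; simp
  have hentry : ∀ k : Nat, d3.getD k 0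
      = (da.count (k : Int) : Int) + (db.count (k : Int) : Int) - (dc.count (k : Int) : Int) := by
    intro k
    rw [E3, E2, E1]
    have : (List.replicate 10 (0 : Int)).getD k 0 = 0 := by
      rcases Nat.lt_or_ge k 10 with hk | hk
      · rw [List.getD_eq_getElem _ _ (by simpa using hk)]; exact List.getElem_replicate _
      · rw [List.getD_eq_default]; simpa using hk
    rw [this]; ring
  rw [Bool.eq_iff_iff]
  rw [minmax_zero_iff d3 (by intro hnil; rw [hnil] at hlen3; simp at hlen3)]
  rw [beq_iff_eq, PySem.List.sorted_id_eq_sorted_id_iff_perm, List.perm_iff_count]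
  constructor
  · intro h v
    by_cases hv : v ∈ da ++ db ∨ v ∈ dc
    · have hv9 : 0 ≤ v ∧ v < 10 := by
        rcases hv with hv | hv
        · rcases List.mem_append.1 hv with hv | hv
          · exact hmem a v (hda ▸ hv)
          · exact hmem b v (hdb ▸ hv)
        · exact hmem c v (hdc ▸ hv)
      have hklt : v.toNat < 10 := by omega
      have hveq : ((v.toNat : Nat) : Int) = v := by omega
      have hz : d3.getD v.toNat 0 = 0 := by
        rw [List.getD_eq_getElem _ _ (by rw [hlen3]; exact hklt)]
        exact h _ (List.getElem_mem _)
      have := hentry v.toNat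
      rw [hz, hveq] at this
      rw [List.count_append]
      omega
    · push Not at hv
      rw [List.count_eq_zero_of_not_mem hv.1, List.count_eq_zero_of_not_mem hv.2]
  · intro h y hy
    obtain ⟨k, hk, rfl⟩ := List.mem_iff_getElem.1 hy
    rw [← List.getD_eq_getElem d3 0 hk, hentry k]
    have := h (k : Int)
    rw [List.count_append] at this
    omega
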